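-- pv_equiv track=rewrite | github.com/delfu/advent2019 | 6.py | number_of_ancestors
-- ===== SOURCE A (Python) =====
-- def number_of_ancestors(star_map, satellite, cache):
--     if satellite in cache:
--         return cache[satellite]
--     if satellite not in star_map:
--         cache[satellite] = 0
--     else:
--         cache[satellite] = (
--             sum(
--                 map(
--                     lambda t: number_of_ancestors(star_map, t, cache),
--                     star_map[satellite],
--                 )
--             )
--             + 1
--         )
--     return cache[satellite]
-- ===== SOURCE B (Python) =====
-- # Iterative post-order DFS with an explicit marked stack instead of recursion;
-- # mutates `cache` with the same node->count entries as the recursive original.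
-- def number_of_ancestors(star_map, satellite, cache):
--     stack = [(satellite, False)]
--     while stack:
--         node, ready = stack.pop()
--         if ready:
--             cache[node] = sum(cache[p] for p in star_map[node]) + 1
--         elif node in cache:
--             pass
--         elif node not in star_map:
--             cache[node] = 0
--         else:
--             stack.append((node, True))
--             pending = [p for p in star_map[node] if p not in cache]
--             stack.extend((p, False) for p in reversed(pending))
--     return cache[satellite]
-- ===== Notes on version B (the rewrite author's own statement) =====
-- stated objective: alternative
-- what changed: Replaces the memoized recursion with an iterative post-order DFS over an explicit marked stack: each node is pushed with a 'ready' flag, uncached parents are pushed first, and the sum is taken when the node's marker frame pops, so there is no recursion (and no recursion-depth limit) while the same cache entries are written in the same order.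
import Mathlib
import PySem

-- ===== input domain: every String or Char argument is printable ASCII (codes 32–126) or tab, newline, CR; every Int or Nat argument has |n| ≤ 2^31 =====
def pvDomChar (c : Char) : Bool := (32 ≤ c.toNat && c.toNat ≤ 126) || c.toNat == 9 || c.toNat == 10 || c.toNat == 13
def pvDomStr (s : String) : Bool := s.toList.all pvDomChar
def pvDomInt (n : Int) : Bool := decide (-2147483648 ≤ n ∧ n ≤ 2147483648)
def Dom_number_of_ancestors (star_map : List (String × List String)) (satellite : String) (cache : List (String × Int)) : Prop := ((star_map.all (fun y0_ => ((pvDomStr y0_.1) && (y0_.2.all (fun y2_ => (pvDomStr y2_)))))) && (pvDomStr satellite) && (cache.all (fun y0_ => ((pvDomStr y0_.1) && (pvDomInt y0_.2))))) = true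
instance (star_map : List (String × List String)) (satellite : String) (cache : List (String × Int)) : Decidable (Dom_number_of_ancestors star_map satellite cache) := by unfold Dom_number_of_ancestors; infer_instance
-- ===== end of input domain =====

-- B replaces A's memoized recursion by an iterative post-order DFS over an explicit
-- marked stack (no recursion); both mutate `cache` identically in Python, and the
-- theorems here are about the RETURN value.

-- ===== PORT A =====
-- every string mentioned in the star map (fuel bounds are derived from it)
def pvMentions (star_map : List (String × List String)) : List String :=
  star_map.flatMap (fun kv => kv.1 :: kv.2)

-- fuel for A's recursion: under Pre_ the recursion depth is below this bound
def pvFuelA (star_map : List (String × List String)) : Nat :=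
  (pvMentions star_map).length + 2

-- literal transliteration of A's recursion; the Nat fuel is totality scaffolding
-- only (under Pre_ it never runs out: see number_of_ancestors_spec).
mutual
def pvGoA (sm : PySem.Dict String (List String)) :
    Nat → PySem.Dict String Int → String → Option (PySem.Dict String Int × Int)
  | 0, _, _ => none
  | f+1, c, x =>
    match PySem.Dict.get? c x with
    | some v => some (c, v)                     -- if satellite in cache: return cache[satellite]
    | none =>
      match PySem.Dict.get? sm x with
      | none => some (PySem.Dict.insert c x 0, 0)   -- cache[satellite] = 0
      | some ps =>
        match pvGoL sm f ps c with              -- sum(map(..., star_map[satellite]))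
        | none => none
        | some (c1, s) => some (PySem.Dict.insert c1 x (s + 1), s + 1)
  termination_by f _ _ => (f, 0)

def pvGoL (sm : PySem.Dict String (List String)) :
    Nat → List String → PySem.Dict String Int → Option (PySem.Dict String Int × Int)
  | _, [], c => some (c, 0)
  | f, p :: ps, c =>
    match pvGoA sm f c p with
    | none => none
    | some (c1, v) =>
      match pvGoL sm f ps c1 with
      | none => none
      | some (c2, s) => some (c2, v + s)
  termination_by f ps _ => (f, ps.length + 1)
end

def number_of_ancestors (star_map : List (String × List String)) (satellite : String) (cache : List (String × Int)) : Int :=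
  match pvGoA (PySem.Dict.mk star_map) (pvFuelA star_map) (PySem.Dict.mk cache) satellite with
  | some r => r.2                               -- return cache[satellite]
  | none => 0                                   -- unreachable under Pre_

-- ===== PORT B =====
-- fuel for B's while loop (totality scaffolding; never runs out under Pre_)
def pvFuelB (star_map : List (String × List String)) : Nat :=
  pvFuelA star_map ^ pvFuelA star_map + 1

-- one-to-one transcription of B's while loop over the explicit marked stack.
-- In the ready branch Python reads star_map[node]; a (node, True) frame is only
-- pushed for keys of star_map, so `getD sm x []` is exact there.
def pvRunB (sm : PySem.Dict String (List String)) :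
    Nat → List (String × Bool) → PySem.Dict String Int → Option (PySem.Dict String Int)
  | 0, _, _ => none
  | _+1, [], c => some c
  | f+1, (x, true) :: st, c =>
      pvRunB sm f st
        (PySem.Dict.insert c x
          ((PySem.Dict.getD sm x []).foldl (fun a p => a + PySem.Dict.getD c p 0) 0 + 1))
  | f+1, (x, false) :: st, c =>
      if (PySem.Dict.get? c x).isSome then pvRunB sm f st c
      else
        match PySem.Dict.get? sm x with
        | none => pvRunB sm f st (PySem.Dict.insert c x 0)
        | some ps =>
            pvRunB sm f
              (((ps.filter (fun p => (PySem.Dict.get? c p).isNone)).map (fun p => (p, false)))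
                ++ (x, true) :: st) c

def number_of_ancestors_alt (star_map : List (String × List String)) (satellite : String) (cache : List (String × Int)) : Int :=
  match pvRunB (PySem.Dict.mk star_map) (pvFuelB star_map) [(satellite, false)] (PySem.Dict.mk cache) with
  | some c => PySem.Dict.getD c satellite 0     -- return cache[satellite]
  | none => 0                                   -- unreachable under Pre_

-- ===== PRECONDITION & SPEC =====
-- parents of u for the purpose of A's traversal: empty once u is already cached
def pvParentsT (sm : PySem.Dict String (List String)) (c0 : PySem.Dict String Int) (u : String) : List String :=
  if (PySem.Dict.get? c0 u).isSome then [] else PySem.Dict.getD sm u []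

def pvExpand (sm : PySem.Dict String (List String)) (c0 : PySem.Dict String Int) (s : List String) : List String :=
  (s ++ s.flatMap (pvParentsT sm c0)).dedup

def pvReach (sm : PySem.Dict String (List String)) (c0 : PySem.Dict String Int) : Nat → List String → List String
  | 0, s => s
  | n+1, s => pvReach sm c0 n (pvExpand sm c0 s)

def pvNIter (star_map : List (String × List String)) : Nat := (pvMentions star_map).length + 1

-- Pre_ excludes exactly the inputs on which A does not return: those where the
-- ancestor walk from `satellite` runs into a cycle among uncached nodes (A's
-- recursion then overflows, RecursionError; B's loop does not terminate either).
def Pre_number_of_ancestors (star_map : List (String × List String)) (satellite : String) (cache : List (String × Int)) : Prop :=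
  ∀ u ∈ pvReach (PySem.Dict.mk star_map) (PySem.Dict.mk cache) (pvNIter star_map) [satellite],
    u ∉ pvReach (PySem.Dict.mk star_map) (PySem.Dict.mk cache) (pvNIter star_map)
          (pvParentsT (PySem.Dict.mk star_map) (PySem.Dict.mk cache) u)

instance (star_map : List (String × List String)) (satellite : String) (cache : List (String × Int)) : Decidable (Pre_number_of_ancestors star_map satellite cache) := by unfold Pre_number_of_ancestors; infer_instance

def pvWitness_number_of_ancestors : (List (String × List String)) × String × (List (String × Int)) :=
  ([("B", ["COM"]), ("C", ["B"]), ("D", ["C", "B"])], "D", [("E", 7)])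

def Spec_number_of_ancestors (star_map : List (String × List String)) (satellite : String) (cache : List (String × Int)) (out : Int) : Prop := out = number_of_ancestors_alt star_map satellite cache
instance (star_map : List (String × List String)) (satellite : String) (cache : List (String × Int)) (out : Int) : Decidable (Spec_number_of_ancestors star_map satellite cache out) := by unfold Spec_number_of_ancestors; infer_instance

-- ===== CLAIM (what is proved, stated in full; the proofs are below) =====
def Claim_equal_number_of_ancestors : Prop := ∀ (star_map : List (String × List String)) (satellite : String) (cache : List (String × Int)), Dom_number_of_ancestors star_map satellite cache → Pre_number_of_ancestors star_map satellite cache → Spec_number_of_ancestors star_map satellite cache (number_of_ancestors star_map satellite cache)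

-- ===== LEMMAS AND PROOFS =====

-- goA/goL only add fresh keys: every existing entry survives with its value
theorem pvGo_mono (sm : PySem.Dict String (List String)) :
    ∀ f : Nat,
      (∀ (c : PySem.Dict String Int) x c' v, pvGoA sm f c x = some (c', v) →
        ∀ k w, PySem.Dict.get? c k = some w → PySem.Dict.get? c' k = some w) ∧
      (∀ (ps : List String) (c : PySem.Dict String Int) c' s, pvGoL sm f ps c = some (c', s) →
        ∀ k w, PySem.Dict.get? c k = some w → PySem.Dict.get? c' k = some w) := by
  intro f
  induction f with
  | zero =>
    constructor
    · intro c x c' v h; simp [pvGoA] at h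
    · intro ps
      induction ps with
      | nil => intro c c' s h k w hk; simp [pvGoL] at h; rw [← h.1]; exact hk
      | cons p ps ih => intro c c' s h; simp [pvGoL, pvGoA] at h
  | succ f ihf =>
    have hA : ∀ (c : PySem.Dict String Int) x c' v, pvGoA sm (f+1) c x = some (c', v) →
        ∀ k w, PySem.Dict.get? c k = some w → PySem.Dict.get? c' k = some w := by
      intro c x c' v h k w hk
      rw [pvGoA] at h
      cases hcx : PySem.Dict.get? c x with
      | some vx => rw [hcx] at h; simp at h; rw [← h.1]; exact hk
      | none =>
        rw [hcx] at h
        cases hsx : PySem.Dict.get? sm x with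
        | none =>
          rw [hsx] at h; simp at h
          have hne : k ≠ x := by intro he; rw [he, hcx] at hk; cases hk
          rw [← h.1, PySem.Dict.get?_insert_of_ne _ _ hne]; exact hk
        | some ps =>
          rw [hsx] at h; simp at h
          cases hgl : pvGoL sm f ps c with
          | none => rw [hgl] at h; simp at h
          | some r =>
            obtain ⟨c1, s⟩ := r
            rw [hgl] at h; simp at h
            have hk1 : PySem.Dict.get? c1 k = some w := ihf.2 ps c c1 s hgl k w hk
            have hne : k ≠ x := by intro he; rw [he, hcx] at hk; cases hk
            rw [← h.1, PySem.Dict.get?_insert_of_ne _ _ hne]; exact hk1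
    refine ⟨hA, ?_⟩
    intro ps
    induction ps with
    | nil => intro c c' s h k w hk; simp [pvGoL] at h; rw [← h.1]; exact hk
    | cons p ps ih =>
      intro c c' s h k w hk
      rw [pvGoL] at h
      cases hga : pvGoA sm (f+1) c p with
      | none => rw [hga] at h; cases h
      | some r =>
        obtain ⟨c1, v⟩ := r
        rw [hga] at h; dsimp only at h
        cases hgl : pvGoL sm (f+1) ps c1 with
        | none => rw [hgl] at h; cases h
        | some r2 =>
          obtain ⟨c2, s2⟩ := r2
          rw [hgl] at h; simp at h
          have hk1 := hA c p c1 v hga k w hk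
          have := ih c1 c2 s2 hgl k w hk1
          rw [← h.1]; exact this

theorem pvGoA_mono (sm : PySem.Dict String (List String)) (f : Nat)
    (c : PySem.Dict String Int) (x : String) (c' : PySem.Dict String Int) (v : Int)
    (h : pvGoA sm f c x = some (c', v)) :
    ∀ k w, PySem.Dict.get? c k = some w → PySem.Dict.get? c' k = some w :=
  (pvGo_mono sm f).1 c x c' v h

theorem pvGoL_mono (sm : PySem.Dict String (List String)) (f : Nat)
    (ps : List String) (c : PySem.Dict String Int) (c' : PySem.Dict String Int) (s : Int)
    (h : pvGoL sm f ps c = some (c', s)) :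
    ∀ k w, PySem.Dict.get? c k = some w → PySem.Dict.get? c' k = some w :=
  (pvGo_mono sm f).2 ps c c' s h

-- the computed node is cached with the returned value
theorem pvGoA_lookup (sm : PySem.Dict String (List String)) (f : Nat)
    (c : PySem.Dict String Int) (x : String) (c' : PySem.Dict String Int) (v : Int)
    (h : pvGoA sm f c x = some (c', v)) : PySem.Dict.get? c' x = some v := by
  cases f with
  | zero => simp [pvGoA] at h
  | succ f =>
    rw [pvGoA] at h
    cases hcx : PySem.Dict.get? c x with
    | some vx => rw [hcx] at h; simp at h; rw [← h.1, ← h.2]; exact hcx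
    | none =>
      rw [hcx] at h
      cases hsx : PySem.Dict.get? sm x with
      | none => rw [hsx] at h; simp at h; rw [← h.1, ← h.2]; exact PySem.Dict.get?_insert_self _ _ _
      | some ps =>
        rw [hsx] at h; dsimp only at h
        cases hgl : pvGoL sm f ps c with
        | none => rw [hgl] at h; cases h
        | some r =>
          obtain ⟨c1, s⟩ := r
          rw [hgl] at h; simp at h
          rw [← h.1, ← h.2]; exact PySem.Dict.get?_insert_self _ _ _

-- the sum returned by goL is the sum B reads back from the final cache
theorem pvGoL_sum (sm : PySem.Dict String (List String)) (f : Nat) :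
    ∀ (ps : List String) (c c' : PySem.Dict String Int) (s : Int),
      pvGoL sm f ps c = some (c', s) →
      s = (ps.map (fun p => PySem.Dict.getD c' p 0)).sum := by
  intro ps
  induction ps with
  | nil => intro c c' s h; simp [pvGoL] at h; simp [h.2]
  | cons p ps ih =>
    intro c c' s h
    rw [pvGoL] at h
    cases hga : pvGoA sm f c p with
    | none => rw [hga] at h; cases h
    | some r =>
      obtain ⟨c1, v⟩ := r
      rw [hga] at h; dsimp only at h
      cases hgl : pvGoL sm f ps c1 with
      | none => rw [hgl] at h; cases h
      | some r2 =>
        obtain ⟨c2, s2⟩ := r2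
        rw [hgl] at h; simp at h
        have hv1 : PySem.Dict.get? c1 p = some v := pvGoA_lookup sm f c p c1 v hga
        have hv' : PySem.Dict.get? c' p = some v := by
          rw [← h.1]; exact pvGoL_mono sm f ps c1 c2 s2 hgl p v hv1
        have hs2 : s2 = (ps.map (fun p => PySem.Dict.getD c2 p 0)).sum := ih c1 c2 s2 hgl
        have hgd : PySem.Dict.getD c' p 0 = v := by
          rw [PySem.Dict.getD_eq_get?_getD, hv']; rfl
        rw [← h.2, hs2, h.1]
        simp [hgd]

-- B's loop is fuel-monotone
theorem pvRunB_mono (sm : PySem.Dict String (List String)) :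
    ∀ (f g : Nat) (st : List (String × Bool)) (c d : PySem.Dict String Int),
      pvRunB sm f st c = some d → f ≤ g → pvRunB sm g st c = some d := by
  intro f
  induction f with
  | zero => intro g st c d h; simp [pvRunB] at h
  | succ f ih =>
    intro g st c d h hle
    obtain ⟨g', rfl⟩ : ∃ g', g = g' + 1 := ⟨g - 1, by omega⟩
    have hle' : f ≤ g' := by omega
    match st with
    | [] => rw [pvRunB] at h ⊢; exact h
    | (x, true) :: st => rw [pvRunB] at h ⊢; exact ih g' _ _ _ h hle'
    | (x, false) :: st =>
      rw [pvRunB] at h ⊢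
      by_cases hc : (PySem.Dict.get? c x).isSome
      · rw [if_pos hc] at h ⊢; exact ih g' _ _ _ h hle'
      · rw [if_neg hc] at h ⊢
        cases hsx : PySem.Dict.get? sm x with
        | none => rw [hsx] at h; dsimp only at h ⊢; exact ih g' _ _ _ h hle'
        | some ps => rw [hsx] at h; dsimp only at h ⊢; exact ih g' _ _ _ h hle'

-- a cached node is returned immediately
theorem pvGoA_cached (sm : PySem.Dict String (List String)) (f : Nat)
    (c : PySem.Dict String Int) (x : String) (v : Int)
    (h : PySem.Dict.get? c x = some v) :
    pvGoA sm (f + 1) c x = some (c, v) := by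
  rw [pvGoA, h]

abbrev pvMemLe (c c' : PySem.Dict String Int) : Prop :=
  ∀ k, (PySem.Dict.get? c k).isSome → (PySem.Dict.get? c' k).isSome

theorem pvMemLe_of_goA (sm : PySem.Dict String (List String)) (f : Nat)
    (c : PySem.Dict String Int) (x : String) (c' : PySem.Dict String Int) (v : Int)
    (h : pvGoA sm f c x = some (c', v)) : pvMemLe c c' := by
  intro k hk
  obtain ⟨w, hw⟩ := Option.isSome_iff_exists.mp hk
  exact Option.isSome_iff_exists.mpr ⟨w, pvGoA_mono sm f c x c' v h k w hw⟩

-- filtering by "uncached" at a later (larger) cache factors through an earlier one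
theorem pvPend_comp (c c1 : PySem.Dict String Int) (hle : pvMemLe c c1) (ps : List String) :
    ps.filter (fun p => (PySem.Dict.get? c1 p).isNone)
      = (ps.filter (fun p => (PySem.Dict.get? c p).isNone)).filter
          (fun p => (PySem.Dict.get? c1 p).isNone) := by
  rw [List.filter_filter]
  apply List.filter_congr
  intro p _
  cases hp : (PySem.Dict.get? c1 p).isNone
  · simp
  · simp only [Bool.true_and]
    have : (PySem.Dict.get? c p).isNone = true := by
      by_contra hcp
      have : (PySem.Dict.get? c p).isSome := by
        cases hh : PySem.Dict.get? c p
        · simp [hh] at hcp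
        · simp
      have := hle p this
      cases hh : PySem.Dict.get? c1 p
      · simp [hh] at this
      · simp [hh] at hp
    rw [this]

-- running goL on the unfiltered list is the same cache as on the pending sublist
theorem pvGoL_unfilter (sm : PySem.Dict String (List String)) (f : Nat) (hf : 1 ≤ f) :
    ∀ (q : List String) (c0 c c2 : PySem.Dict String Int) (t : Int),
      pvMemLe c0 c →
      pvGoL sm f (q.filter (fun p => (PySem.Dict.get? c0 p).isNone)) c = some (c2, t) →
      ∃ t', pvGoL sm f q c = some (c2, t') := by
  intro q
  induction q with
  | nil => intro c0 c c2 t _ h; simp [pvGoL] at h ⊢; exact h.1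
  | cons p q ih =>
    intro c0 c c2 t hle h
    obtain ⟨f', rfl⟩ : ∃ f', f = f' + 1 := ⟨f - 1, by omega⟩
    by_cases hp0 : (PySem.Dict.get? c0 p).isNone
    · -- p kept by the filter
      rw [List.filter_cons_of_pos (by simpa using hp0)] at h
      rw [pvGoL] at h
      cases hga : pvGoA sm (f' + 1) c p with
      | none => rw [hga] at h; cases h
      | some r =>
        obtain ⟨c1, v⟩ := r
        rw [hga] at h; dsimp only at h
        cases hgl : pvGoL sm (f' + 1) (q.filter (fun p => (PySem.Dict.get? c0 p).isNone)) c1 with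
        | none => rw [hgl] at h; cases h
        | some r2 =>
          obtain ⟨c2', t2⟩ := r2
          rw [hgl] at h; simp at h
          have hle1 : pvMemLe c0 c1 := fun k hk => pvMemLe_of_goA sm _ c p c1 v hga k (hle k hk)
          obtain ⟨t', ht'⟩ := ih c0 c1 c2' t2 hle1 hgl
          refine ⟨v + t', ?_⟩
          rw [pvGoL, hga]; dsimp only
          rw [ht', h.1]
    · -- p dropped by the filter: it is cached in c0, hence in c
      rw [List.filter_cons_of_neg (by simpa using hp0)] at h
      have hpc : (PySem.Dict.get? c p).isSome := by
        apply hle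
        cases hh : PySem.Dict.get? c0 p
        · simp [hh] at hp0
        · simp
      obtain ⟨v, hv⟩ := Option.isSome_iff_exists.mp hpc
      obtain ⟨t', ht'⟩ := ih c0 c c2 t hle h
      refine ⟨v + t', ?_⟩
      rw [pvGoL, pvGoA_cached sm f' c p v hv]; dsimp only
      rw [ht']

-- goL on the full parents list = goL on its uncached (pending) sublist: same cache
theorem pvGoL_pend (sm : PySem.Dict String (List String)) (f : Nat) :
    ∀ (ps : List String) (c c' : PySem.Dict String Int) (s : Int),
      pvGoL sm f ps c = some (c', s) →
      ∃ s', pvGoL sm f (ps.filter (fun p => (PySem.Dict.get? c p).isNone)) c = some (c', s') := by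
  intro ps
  induction ps with
  | nil => intro c c' s h; exact ⟨s, h⟩
  | cons p ps ih =>
    intro c c' s h
    rw [pvGoL] at h
    cases hga : pvGoA sm f c p with
    | none => rw [hga] at h; cases h
    | some r =>
      obtain ⟨c1, v⟩ := r
      rw [hga] at h; dsimp only at h
      cases hgl : pvGoL sm f ps c1 with
      | none => rw [hgl] at h; cases h
      | some r2 =>
        obtain ⟨c2, s2⟩ := r2
        rw [hgl] at h; simp at h
        obtain ⟨f', rfl⟩ : ∃ f', f = f' + 1 := by
          cases f with
          | zero => simp [pvGoA] at hga
          | succ f => exact ⟨f, rfl⟩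
        by_cases hpc : (PySem.Dict.get? c p).isNone
        · -- p uncached: kept in the pending list
          rw [List.filter_cons_of_pos (by simpa using hpc)]
          -- IH at (ps, c1) then unfilter back from c1's filter to c's filter
          obtain ⟨s3, hs3⟩ := ih c1 c2 s2 hgl
          have hle : pvMemLe c c1 := pvMemLe_of_goA sm _ c p c1 v hga
          have hcomp := pvPend_comp c c1 hle ps
          rw [hcomp] at hs3
          obtain ⟨t', ht'⟩ := pvGoL_unfilter sm (f' + 1) (by omega)
            (ps.filter (fun p => (PySem.Dict.get? c p).isNone)) c1 c1 c2 s3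
            (fun k hk => hk) hs3
          refine ⟨v + t', ?_⟩
          rw [pvGoL, hga]; dsimp only
          rw [ht', h.1]
        · -- p cached in c: dropped; goA was the identity
          have : ∃ v0, PySem.Dict.get? c p = some v0 := by
            cases hh : PySem.Dict.get? c p
            · simp [hh] at hpc
            · exact ⟨_, rfl⟩
          obtain ⟨v0, hv0⟩ := this
          rw [pvGoA_cached sm f' c p v0 hv0] at hga
          have hpair : c = c1 ∧ v0 = v := by simpa using hga
          rw [List.filter_cons_of_neg (by simpa using hpc)]
          rw [← hpair.1] at hgl
          obtain ⟨s', hs'⟩ := ih c c2 s2 hgl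
          exact ⟨s', by rw [hs', h.1]⟩

-- processing a list of pushed (p, false) frames = running goL over it
theorem pvRunB_sim_list (sm : PySem.Dict String (List String)) (M : Nat) (f : Nat)
    (hA : ∀ (c : PySem.Dict String Int) x c' v, pvGoA sm f c x = some (c', v) →
      ∀ st fB d, pvRunB sm fB st c' = some d →
        pvRunB sm (M ^ f + fB) ((x, false) :: st) c = some d) :
    ∀ (q : List String) (c c' : PySem.Dict String Int) (s : Int),
      pvGoL sm f q c = some (c', s) →
      ∀ st fB d, pvRunB sm fB st c' = some d →
        pvRunB sm (q.length * M ^ f + fB) (q.map (fun p => (p, false)) ++ st) c = some d := by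
  intro q
  induction q with
  | nil =>
    intro c c' s h st fB d hd
    simp [pvGoL] at h
    simpa [h.1] using hd
  | cons p q ih =>
    intro c c' s h st fB d hd
    rw [pvGoL] at h
    cases hga : pvGoA sm f c p with
    | none => rw [hga] at h; cases h
    | some r =>
      obtain ⟨c1, v⟩ := r
      rw [hga] at h; dsimp only at h
      cases hgl : pvGoL sm f q c1 with
      | none => rw [hgl] at h; cases h
      | some r2 =>
        obtain ⟨c2, s2⟩ := r2
        rw [hgl] at h; simp at h
        rw [h.1] at hgl
        have hq := ih c1 c' s2 hgl st fB d hd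
        have := hA c p c1 v hga (q.map (fun p => (p, false)) ++ st) (q.length * M ^ f + fB) d hq
        have harith : M ^ f + (q.length * M ^ f + fB) = (p :: q).length * M ^ f + fB := by
          simp [List.length_cons, Nat.succ_mul]; ring
        rw [harith] at this
        simpa using this

-- the heart: the stack machine simulates A's recursion step for step
theorem pvRunB_sim (sm : PySem.Dict String (List String)) (M : Nat)
    (hM2 : 2 ≤ M)
    (hM : ∀ x ps, PySem.Dict.get? sm x = some ps → ps.length + 2 ≤ M) :
    ∀ (f : Nat) (c : PySem.Dict String Int) (x : String) (c' : PySem.Dict String Int) (v : Int),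
      pvGoA sm f c x = some (c', v) →
      ∀ st fB d, pvRunB sm fB st c' = some d →
        pvRunB sm (M ^ f + fB) ((x, false) :: st) c = some d := by
  intro f
  induction f with
  | zero => intro c x c' v h; simp [pvGoA] at h
  | succ f ih =>
    intro c x c' v h st fB d hd
    have hpow : 1 ≤ M ^ (f + 1) := Nat.one_le_pow _ _ (by omega)
    rw [pvGoA] at h
    cases hcx : PySem.Dict.get? c x with
    | some vx =>
      rw [hcx] at h; simp at h
      have hstep : pvRunB sm (fB + 1) ((x, false) :: st) c = some d := by
        rw [pvRunB]
        rw [if_pos (by simp [hcx])]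
        rw [h.1]; exact hd
      exact pvRunB_mono sm (fB + 1) (M ^ (f + 1) + fB) _ _ _ hstep (by omega)
    | none =>
      rw [hcx] at h
      cases hsx : PySem.Dict.get? sm x with
      | none =>
        rw [hsx] at h; dsimp only at h; simp at h
        have hstep : pvRunB sm (fB + 1) ((x, false) :: st) c = some d := by
          rw [pvRunB]
          rw [if_neg (by simp [hcx])]
          rw [hsx]; dsimp only
          rw [h.1]; exact hd
        exact pvRunB_mono sm (fB + 1) (M ^ (f + 1) + fB) _ _ _ hstep (by omega)
      | some ps =>
        rw [hsx] at h; dsimp only at h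
        cases hgl : pvGoL sm f ps c with
        | none => rw [hgl] at h; cases h
        | some r =>
          obtain ⟨c1, s⟩ := r
          rw [hgl] at h; simp at h
          obtain ⟨s', hpend⟩ := pvGoL_pend sm f ps c c1 s hgl
          have hsum : s = (ps.map (fun p => PySem.Dict.getD c1 p 0)).sum :=
            pvGoL_sum sm f ps c c1 s hgl
          have hmark : pvRunB sm (fB + 1) ((x, true) :: st) c1 = some d := by
            rw [pvRunB]
            have hgd : PySem.Dict.getD sm x [] = ps := by
              rw [PySem.Dict.getD_eq_get?_getD, hsx]; rfl
            rw [hgd]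
            have hfold : (ps.foldl (fun a p => a + PySem.Dict.getD c1 p 0) 0) = s := by
              rw [PySem.List.foldl_add]; simp [← hsum]
            rw [hfold, h.1]
            exact hd
          have hq := pvRunB_sim_list sm M f ih
            (ps.filter (fun p => (PySem.Dict.get? c p).isNone)) c c1 s' hpend
            ((x, true) :: st) (fB + 1) d hmark
          set q := ps.filter (fun p => (PySem.Dict.get? c p).isNone) with hqdef
          have hstep : pvRunB sm (q.length * M ^ f + (fB + 1) + 1) ((x, false) :: st) c = some d := by
            rw [pvRunB]
            rw [if_neg (by simp [hcx])]
            rw [hsx]; dsimp only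
            exact hq
          apply pvRunB_mono sm _ (M ^ (f + 1) + fB) _ _ _ hstep
          have hlen : q.length + 2 ≤ M := by
            have h1 : q.length ≤ ps.length := List.length_filter_le _ _
            have h2 := hM x ps hsx
            omega
          have ha : 1 ≤ M ^ f := Nat.one_le_pow _ _ (by omega)
          calc q.length * M ^ f + (fB + 1) + 1
              = q.length * M ^ f + 2 + fB := by ring
            _ ≤ q.length * M ^ f + 2 * M ^ f + fB := by omega
            _ = (q.length + 2) * M ^ f + fB := by ring
            _ ≤ M * M ^ f + fB := by
                have := Nat.mul_le_mul_right (M ^ f) hlen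
                omega
            _ = M ^ (f + 1) + fB := by rw [pow_succ]; ring

-- "u is resolvable within depth n" (used only in the proofs below)
def pvRes (sm : PySem.Dict String (List String)) (c0 : PySem.Dict String Int) : Nat → String → Bool
  | 0, u => (PySem.Dict.get? c0 u).isSome
  | n+1, u => (PySem.Dict.get? c0 u).isSome ||
      (match PySem.Dict.get? sm u with
       | none => true
       | some ps => ps.all (fun p => pvRes sm c0 n p))

theorem pvRes_mono (sm : PySem.Dict String (List String)) (c0 : PySem.Dict String Int) :
    ∀ n u, pvRes sm c0 n u = true → pvRes sm c0 (n+1) u = true := by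
  intro n
  induction n with
  | zero => intro u h; rw [pvRes] at h; rw [pvRes, h]; simp
  | succ n ih =>
    intro u h
    rw [pvRes] at h
    rw [pvRes]
    rcases Bool.or_eq_true_iff.mp h with h1 | h2
    · rw [h1]; simp
    · apply Bool.or_eq_true_iff.mpr; right
      cases hsx : PySem.Dict.get? sm u with
      | none => rfl
      | some ps =>
        rw [hsx] at h2; dsimp only at h2 ⊢
        rw [List.all_eq_true] at h2 ⊢
        intro p hp
        exact ih p (h2 p hp)

theorem pvRes_le (sm : PySem.Dict String (List String)) (c0 : PySem.Dict String Int)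
    (n m : Nat) (hnm : n ≤ m) (u : String) (h : pvRes sm c0 n u = true) :
    pvRes sm c0 m u = true := by
  induction m with
  | zero => have : n = 0 := by omega
            rw [this] at h; exact h
  | succ m ih =>
    rcases Nat.lt_or_ge n (m+1) with hlt | hge
    · exact pvRes_mono sm c0 m u (ih (by omega))
    · have : n = m + 1 := by omega
      rw [this] at h; exact h

-- resolvability within n means A's recursion succeeds with fuel n+1,
-- from any cache extending the initial one
theorem pvGoA_total (sm : PySem.Dict String (List String)) (c0 : PySem.Dict String Int) :
    ∀ (n : Nat) (u : String) (c : PySem.Dict String Int), pvMemLe c0 c →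
      pvRes sm c0 n u = true → ∃ r, pvGoA sm (n+1) c u = some r := by
  intro n
  induction n with
  | zero =>
    intro u c hle h
    rw [pvRes] at h
    have := hle u h
    obtain ⟨v, hv⟩ := Option.isSome_iff_exists.mp this
    exact ⟨(c, v), pvGoA_cached sm 0 c u v hv⟩
  | succ n ih =>
    intro u c hle h
    cases hcu : PySem.Dict.get? c u with
    | some v => exact ⟨(c, v), pvGoA_cached sm (n+1) c u v hcu⟩
    | none =>
      have hc0u : (PySem.Dict.get? c0 u).isSome = false := by
        by_contra hx
        have := hle u (by simp only [Bool.not_eq_false] at hx; exact hx)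
        rw [hcu] at this; simp at this
      rw [pvRes, hc0u] at h; simp only [Bool.false_or] at h
      cases hsx : PySem.Dict.get? sm u with
      | none =>
        refine ⟨(PySem.Dict.insert c u 0, 0), ?_⟩
        rw [pvGoA, hcu, hsx]
      | some ps =>
        rw [hsx] at h; dsimp only at h
        rw [List.all_eq_true] at h
        -- the parents loop succeeds from any cache extending c0
        have hloop : ∀ (qs : List String), (∀ p ∈ qs, pvRes sm c0 n p = true) →
            ∀ (c1 : PySem.Dict String Int), pvMemLe c0 c1 →
            ∃ r, pvGoL sm (n+1) qs c1 = some r := by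
          intro qs
          induction qs with
          | nil => intro _ c1 _; exact ⟨(c1, 0), by rw [pvGoL]⟩
          | cons p qs ihq =>
            intro hqs c1 hle1
            obtain ⟨⟨c2, v⟩, hga⟩ := ih p c1 hle1 (hqs p (by simp))
            have hle2 : pvMemLe c0 c2 := fun k hk =>
              pvMemLe_of_goA sm (n+1) c1 p c2 v hga k (hle1 k hk)
            obtain ⟨⟨c3, s⟩, hgl⟩ := ihq (fun p hp => hqs p (by simp [hp])) c2 hle2
            refine ⟨(c3, v + s), ?_⟩
            rw [pvGoL, hga]; dsimp only
            rw [hgl]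
        obtain ⟨⟨c1, s⟩, hgl⟩ := hloop ps (fun p hp => h p hp) c hle
        refine ⟨(PySem.Dict.insert c1 u (s + 1), s + 1), ?_⟩
        rw [pvGoA, hcu, hsx]; dsimp only
        rw [hgl]

-- ---- reachability machinery for Pre_ ----
theorem pvMem_expand (sm : PySem.Dict String (List String)) (c0 : PySem.Dict String Int)
    (s : List String) (x : String) :
    x ∈ pvExpand sm c0 s ↔ x ∈ s ∨ ∃ u ∈ s, x ∈ pvParentsT sm c0 u := by
  simp [pvExpand, List.mem_dedup, List.mem_append, List.mem_flatMap]

theorem pvReach_expand_comm (sm : PySem.Dict String (List String)) (c0 : PySem.Dict String Int) :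
    ∀ (n : Nat) (s : List String),
      pvReach sm c0 n (pvExpand sm c0 s) = pvExpand sm c0 (pvReach sm c0 n s) := by
  intro n
  induction n with
  | zero => intro s; rfl
  | succ n ih => intro s; rw [pvReach, pvReach, ih]

theorem pvReach_succ_right (sm : PySem.Dict String (List String)) (c0 : PySem.Dict String Int)
    (n : Nat) (s : List String) :
    pvReach sm c0 (n+1) s = pvExpand sm c0 (pvReach sm c0 n s) := by
  rw [pvReach, pvReach_expand_comm]

theorem pvSubset_reach (sm : PySem.Dict String (List String)) (c0 : PySem.Dict String Int) :
    ∀ (n : Nat) (s : List String) (x : String), x ∈ s → x ∈ pvReach sm c0 n s := by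
  intro n
  induction n with
  | zero => intro s x hx; exact hx
  | succ n ih =>
    intro s x hx
    rw [pvReach]
    exact ih _ x ((pvMem_expand sm c0 s x).mpr (Or.inl hx))

theorem pvReach_elems (sm : PySem.Dict String (List String)) (c0 : PySem.Dict String Int) :
    ∀ (n : Nat) (s : List String) (x : String), x ∈ pvReach sm c0 n s →
      x ∈ s ∨ ∃ u, x ∈ pvParentsT sm c0 u := by
  intro n
  induction n with
  | zero => intro s x hx; exact Or.inl hx
  | succ n ih =>
    intro s x hx
    rw [pvReach] at hx
    rcases ih _ x hx with h | h
    · rcases (pvMem_expand sm c0 s x).mp h with h1 | ⟨u, _, h2⟩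
      · exact Or.inl h1
      · exact Or.inr ⟨u, h2⟩
    · exact Or.inr h

-- reach of a seed inside a parentsT-closed set stays inside the set
theorem pvReach_in_closed (sm : PySem.Dict String (List String)) (c0 : PySem.Dict String Int)
    (C : List String) (hcl : ∀ v ∈ C, ∀ p ∈ pvParentsT sm c0 v, p ∈ C) :
    ∀ (n : Nat) (s : List String), (∀ x ∈ s, x ∈ C) →
      ∀ x ∈ pvReach sm c0 n s, x ∈ C := by
  intro n
  induction n with
  | zero => intro s hs x hx; exact hs x hx
  | succ n ih =>
    intro s hs x hx
    rw [pvReach] at hx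
    refine ih _ ?_ x hx
    intro y hy
    rcases (pvMem_expand sm c0 s y).mp hy with h | ⟨u, hu, h2⟩
    · exact hs y h
    · exact hcl u (hs u hu) y h2

theorem pvReach_fix (sm : PySem.Dict String (List String)) (c0 : PySem.Dict String Int)
    (t : List String) (hfix : ∀ x, x ∈ pvExpand sm c0 t ↔ x ∈ t) :
    ∀ (n : Nat) (x : String), x ∈ pvReach sm c0 n t ↔ x ∈ t := by
  intro n
  induction n with
  | zero => intro x; rfl
  | succ n ih =>
    intro x
    rw [pvReach_succ_right]
    rw [pvMem_expand]
    constructor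
    · rintro (h | ⟨u, hu, h2⟩)
      · exact ih x |>.mp h
      · exact (hfix x).mp ((pvMem_expand sm c0 t x).mpr (Or.inr ⟨u, (ih u).mp hu, h2⟩))
    · intro h
      exact Or.inl ((ih x).mpr h)

theorem pvReach_add (sm : PySem.Dict String (List String)) (c0 : PySem.Dict String Int) :
    ∀ (b a : Nat) (s : List String),
      pvReach sm c0 (a + b) s = pvReach sm c0 a (pvReach sm c0 b s) := by
  intro b
  induction b with
  | zero => intro a s; rfl
  | succ b ih =>
    intro a s
    have : a + (b + 1) = (a + b) + 1 := by omega
    rw [this, pvReach, pvReach, ih]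

-- after NIter-many expansions the reachable set is saturated
theorem pvReach_saturated (sm : PySem.Dict String (List String)) (c0 : PySem.Dict String Int)
    (N : Nat) (s : List String) (U : Finset String)
    (hPU : ∀ u p, p ∈ pvParentsT sm c0 u → p ∈ U)
    (hcard : (s.toFinset ∪ U).card < s.toFinset.card + N) :
    ∀ x, x ∈ pvExpand sm c0 (pvReach sm c0 N s) ↔ x ∈ pvReach sm c0 N s := by
  by_contra hne
  -- no stage i ≤ N is a fixpoint
  have hnofix : ∀ i, i ≤ N → ¬ (∀ x, x ∈ pvExpand sm c0 (pvReach sm c0 i s) ↔ x ∈ pvReach sm c0 i s) := by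
    intro i hi hfix
    apply hne
    intro x
    have hNi : ∀ y, y ∈ pvReach sm c0 N s ↔ y ∈ pvReach sm c0 i s := by
      intro y
      have : N = (N - i) + i := by omega
      rw [this, pvReach_add]
      exact pvReach_fix sm c0 _ hfix (N - i) y
    constructor
    · intro hx
      rcases (pvMem_expand sm c0 _ x).mp hx with h | ⟨u, hu, h2⟩
      · exact h
      · exact (hNi x).mpr ((hfix x).mp ((pvMem_expand sm c0 _ x).mpr (Or.inr ⟨u, (hNi u).mp hu, h2⟩)))
    · intro hx
      exact (pvMem_expand sm c0 _ x).mpr (Or.inl hx)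
  -- strict growth of the toFinsets up to stage N
  have hgrow : ∀ i, i ≤ N → s.toFinset.card + i ≤ (pvReach sm c0 i s).toFinset.card := by
    intro i
    induction i with
    | zero => intro _; simp [pvReach]
    | succ i ih =>
      intro hi
      have h1 := ih (by omega)
      have h2 := hnofix i (by omega)
      rw [Classical.not_forall] at h2
      obtain ⟨y, hy⟩ := h2
      have hysub : y ∈ pvExpand sm c0 (pvReach sm c0 i s) ∧ y ∉ pvReach sm c0 i s := by
        by_cases hmem : y ∈ pvReach sm c0 i s
        · exact absurd (iff_of_true ((pvMem_expand sm c0 _ y).mpr (Or.inl hmem)) hmem) hy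
        · constructor
          · by_contra hno
            exact hy (iff_of_false hno hmem)
          · exact hmem
      have hss : (pvReach sm c0 i s).toFinset ⊂ (pvReach sm c0 (i+1) s).toFinset := by
        rw [pvReach_succ_right]
        constructor
        · intro z hz
          rw [List.mem_toFinset] at hz ⊢
          exact (pvMem_expand sm c0 _ z).mpr (Or.inl hz)
        · intro hsub
          have := hsub (List.mem_toFinset.mpr hysub.1)
          exact hysub.2 (List.mem_toFinset.mp this)
      have := Finset.card_lt_card hss
      omega
  have hbound : (pvReach sm c0 N s).toFinset ⊆ s.toFinset ∪ U := by
    intro x hx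
    rw [List.mem_toFinset] at hx
    rcases pvReach_elems sm c0 N s x hx with h | ⟨u, h⟩
    · exact Finset.mem_union_left _ (List.mem_toFinset.mpr h)
    · exact Finset.mem_union_right _ (hPU u x h)
  have := Finset.card_le_card hbound
  have := hgrow N (le_refl N)
  omega

theorem pvReach_closed' (sm : PySem.Dict String (List String)) (c0 : PySem.Dict String Int)
    (N : Nat) (s : List String) (U : Finset String)
    (hPU : ∀ u p, p ∈ pvParentsT sm c0 u → p ∈ U)
    (hcard : (s.toFinset ∪ U).card < s.toFinset.card + N) :
    ∀ x ∈ pvReach sm c0 N s, ∀ p ∈ pvParentsT sm c0 x, p ∈ pvReach sm c0 N s := by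
  intro x hx p hp
  exact (pvReach_saturated sm c0 N s U hPU hcard p).mp
    ((pvMem_expand sm c0 _ p).mpr (Or.inr ⟨x, hx, hp⟩))

-- facts about Dict.mk and pvMentions
theorem pvGet?_mk_mentions (l : List (String × List String)) :
    ∀ (u : String) (ps : List String), PySem.Dict.get? (PySem.Dict.mk l) u = some ps →
      ps.length ≤ (pvMentions l).length ∧ ∀ p ∈ ps, p ∈ pvMentions l := by
  induction l with
  | nil => intro u ps h; simp [PySem.Dict.get?] at h
  | cons kv l ih =>
    intro u ps h
    obtain ⟨k, vs⟩ := kv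
    rw [PySem.Dict.get?_mk_cons] at h
    have hm : pvMentions ((k, vs) :: l) = (k :: vs) ++ pvMentions l := by
      simp [pvMentions]
    by_cases hk : k == u
    · rw [if_pos hk] at h
      have : vs = ps := by simpa using h
      subst this
      constructor
      · rw [hm]; simp; omega
      · intro p hp; rw [hm]; simp [hp]
    · rw [if_neg hk] at h
      obtain ⟨h1, h2⟩ := ih u ps h
      constructor
      · rw [hm]; simp; omega
      · intro p hp; rw [hm]; simp [h2 p hp]

theorem pvParentsT_mentions (l : List (String × List String)) (c0 : PySem.Dict String Int)
    (u p : String) (hp : p ∈ pvParentsT (PySem.Dict.mk l) c0 u) : p ∈ pvMentions l := by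
  rw [pvParentsT] at hp
  by_cases hc : (PySem.Dict.get? c0 u).isSome
  · rw [if_pos hc] at hp; cases hp
  · rw [if_neg hc] at hp
    rw [PySem.Dict.getD_eq_get?_getD] at hp
    cases hg : PySem.Dict.get? (PySem.Dict.mk l) u with
    | none => rw [hg] at hp; cases hp
    | some ps =>
      rw [hg] at hp
      exact (pvGet?_mk_mentions l u ps hg).2 p hp

theorem pvHPU (l : List (String × List String)) (c0 : PySem.Dict String Int) :
    ∀ u p, p ∈ pvParentsT (PySem.Dict.mk l) c0 u → p ∈ (pvMentions l).toFinset :=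
  fun u p hp => List.mem_toFinset.mpr (pvParentsT_mentions l c0 u p hp)

theorem pvCard_seed_sub (l : List (String × List String)) (s : List String)
    (hs : ∀ x ∈ s, x ∈ pvMentions l) :
    (s.toFinset ∪ (pvMentions l).toFinset).card < s.toFinset.card + pvNIter l := by
  have hsub : s.toFinset ∪ (pvMentions l).toFinset = (pvMentions l).toFinset := by
    apply Finset.union_eq_right.mpr
    intro x hx
    exact List.mem_toFinset.mpr (hs x (List.mem_toFinset.mp hx))
  rw [hsub]
  have := (pvMentions l).toFinset_card_le
  rw [pvNIter]
  omega

theorem pvCard_seed_single (l : List (String × List String)) (sat : String) :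
    (([sat] : List String).toFinset ∪ (pvMentions l).toFinset).card
      < ([sat] : List String).toFinset.card + pvNIter l := by
  have h1 := Finset.card_union_le ([sat] : List String).toFinset (pvMentions l).toFinset
  have h2 := (pvMentions l).toFinset_card_le
  have h3 : ([sat] : List String).toFinset.card = 1 := by simp
  rw [pvNIter]
  omega

-- under Pre_, every node reachable from the satellite is resolvable within
-- the cardinality of its strict ancestor closure
theorem pvRes_of_pre (l : List (String × List String)) (sat : String) (cache : List (String × Int))
    (hPre : Pre_number_of_ancestors l sat cache) :
    ∀ (n : Nat) (u : String),
      u ∈ pvReach (PySem.Dict.mk l) (PySem.Dict.mk cache) (pvNIter l) [sat] →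
      (pvReach (PySem.Dict.mk l) (PySem.Dict.mk cache) (pvNIter l)
        (pvParentsT (PySem.Dict.mk l) (PySem.Dict.mk cache) u)).toFinset.card ≤ n →
      pvRes (PySem.Dict.mk l) (PySem.Dict.mk cache) (n+1) u = true := by
  intro n
  induction n using Nat.strong_induction_on with
  | _ n ih =>
    intro u hu hcard
    by_cases hc : (PySem.Dict.get? (PySem.Dict.mk cache) u).isSome
    · rw [pvRes, hc]; simp
    · cases hsx : PySem.Dict.get? (PySem.Dict.mk l) u with
      | none =>
        have hcf : (PySem.Dict.get? (PySem.Dict.mk cache) u).isSome = false := by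
          cases hg : PySem.Dict.get? (PySem.Dict.mk cache) u
          · rfl
          · exact absurd (by simp [hg]) hc
        rw [pvRes, hcf, hsx]
        simp
      | some ps =>
        have hPu : pvParentsT (PySem.Dict.mk l) (PySem.Dict.mk cache) u = ps := by
          rw [pvParentsT, if_neg hc, PySem.Dict.getD_eq_get?_getD, hsx]; rfl
        have hRTclosed := pvReach_closed' (PySem.Dict.mk l) (PySem.Dict.mk cache)
          (pvNIter l) [sat] (pvMentions l).toFinset (pvHPU l _) (pvCard_seed_single l sat)
        have hCuclosed := pvReach_closed' (PySem.Dict.mk l) (PySem.Dict.mk cache)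
          (pvNIter l) (pvParentsT (PySem.Dict.mk l) (PySem.Dict.mk cache) u)
          (pvMentions l).toFinset (pvHPU l _)
          (pvCard_seed_sub l _ (fun x hx => pvParentsT_mentions l _ u x hx))
        have hall : ∀ p ∈ ps, pvRes (PySem.Dict.mk l) (PySem.Dict.mk cache) n p = true := by
          intro p hp
          have hpPu : p ∈ pvParentsT (PySem.Dict.mk l) (PySem.Dict.mk cache) u := by
            rw [hPu]; exact hp
          have hpRT : p ∈ pvReach (PySem.Dict.mk l) (PySem.Dict.mk cache) (pvNIter l) [sat] :=
            hRTclosed u hu p hpPu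
          have hpCu : p ∈ pvReach (PySem.Dict.mk l) (PySem.Dict.mk cache) (pvNIter l)
              (pvParentsT (PySem.Dict.mk l) (PySem.Dict.mk cache) u) :=
            pvSubset_reach _ _ _ _ p hpPu
          have hn1 : 1 ≤ n := by
            have : 0 < (pvReach (PySem.Dict.mk l) (PySem.Dict.mk cache) (pvNIter l)
                (pvParentsT (PySem.Dict.mk l) (PySem.Dict.mk cache) u)).toFinset.card :=
              Finset.card_pos.mpr ⟨p, List.mem_toFinset.mpr hpCu⟩
            omega
          by_cases hpc : (PySem.Dict.get? (PySem.Dict.mk cache) p).isSome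
          · exact pvRes_le _ _ 0 n (by omega) p (by rw [pvRes]; exact hpc)
          · cases hpx : PySem.Dict.get? (PySem.Dict.mk l) p with
            | none =>
              apply pvRes_le _ _ 1 n hn1 p
              have hpcf : (PySem.Dict.get? (PySem.Dict.mk cache) p).isSome = false := by
                cases hg : PySem.Dict.get? (PySem.Dict.mk cache) p
                · rfl
                · exact absurd (by simp [hg]) hpc
              rw [pvRes, hpcf, hpx]
              simp
            | some qs =>
              -- strict decrease of the ancestor-closure cardinality
              have hsub : ∀ x ∈ pvReach (PySem.Dict.mk l) (PySem.Dict.mk cache) (pvNIter l)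
                  (pvParentsT (PySem.Dict.mk l) (PySem.Dict.mk cache) p),
                  x ∈ pvReach (PySem.Dict.mk l) (PySem.Dict.mk cache) (pvNIter l)
                    (pvParentsT (PySem.Dict.mk l) (PySem.Dict.mk cache) u) := by
                apply pvReach_in_closed _ _ _ hCuclosed
                intro x hx
                exact hCuclosed p hpCu x hx
              have hnp : p ∉ pvReach (PySem.Dict.mk l) (PySem.Dict.mk cache) (pvNIter l)
                  (pvParentsT (PySem.Dict.mk l) (PySem.Dict.mk cache) p) := hPre p hpRT
              have hss : (pvReach (PySem.Dict.mk l) (PySem.Dict.mk cache) (pvNIter l)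
                    (pvParentsT (PySem.Dict.mk l) (PySem.Dict.mk cache) p)).toFinset
                  ⊂ (pvReach (PySem.Dict.mk l) (PySem.Dict.mk cache) (pvNIter l)
                    (pvParentsT (PySem.Dict.mk l) (PySem.Dict.mk cache) u)).toFinset := by
                constructor
                · intro z hz
                  exact List.mem_toFinset.mpr (hsub z (List.mem_toFinset.mp hz))
                · intro hco
                  exact hnp (List.mem_toFinset.mp (hco (List.mem_toFinset.mpr hpCu)))
              have hlt := Finset.card_lt_card hss
              have hres := ih (n-1) (by omega) p hpRT (by omega)
              have : n - 1 + 1 = n := by omega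
              rw [this] at hres
              exact hres
        have hcf : (PySem.Dict.get? (PySem.Dict.mk cache) u).isSome = false := by
          cases hg : PySem.Dict.get? (PySem.Dict.mk cache) u
          · rfl
          · exact absurd (by simp [hg]) hc
        rw [pvRes, hcf, hsx]
        simp only [Bool.false_or]
        rw [List.all_eq_true]
        exact fun p hp => hall p hp

-- ===== VERDICT (by name: the statement is the Claim_ definition above) =====
theorem number_of_ancestors_spec : Claim_equal_number_of_ancestors := by
  intro l sat cache _hDom hPre
  unfold Spec_number_of_ancestors
  -- A's recursion succeeds with fuel pvFuelA l
  have hsatRT : sat ∈ pvReach (PySem.Dict.mk l) (PySem.Dict.mk cache) (pvNIter l) [sat] :=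
    pvSubset_reach _ _ _ _ sat (by simp)
  have hcard : (pvReach (PySem.Dict.mk l) (PySem.Dict.mk cache) (pvNIter l)
      (pvParentsT (PySem.Dict.mk l) (PySem.Dict.mk cache) sat)).toFinset.card
      ≤ (pvMentions l).length := by
    have hsub : (pvReach (PySem.Dict.mk l) (PySem.Dict.mk cache) (pvNIter l)
        (pvParentsT (PySem.Dict.mk l) (PySem.Dict.mk cache) sat)).toFinset
        ⊆ (pvMentions l).toFinset := by
      intro x hx
      rw [List.mem_toFinset] at hx ⊢
      rcases pvReach_elems _ _ _ _ x hx with h | ⟨u, h⟩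
      · exact pvParentsT_mentions l _ sat x h
      · exact pvParentsT_mentions l _ u x h
    have h1 := Finset.card_le_card hsub
    have h2 := (pvMentions l).toFinset_card_le
    omega
  have hres := pvRes_of_pre l sat cache hPre (pvMentions l).length sat hsatRT hcard
  obtain ⟨⟨cstar, v⟩, hga⟩ := pvGoA_total (PySem.Dict.mk l) (PySem.Dict.mk cache)
    ((pvMentions l).length + 1) sat (PySem.Dict.mk cache) (fun k hk => hk) hres
  have hgaF : pvGoA (PySem.Dict.mk l) (pvFuelA l) (PySem.Dict.mk cache) sat = some (cstar, v) := by
    have he : pvFuelA l = (pvMentions l).length + 1 + 1 := by rw [pvFuelA]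
    rw [he]; exact hga
  have hM2 : 2 ≤ pvFuelA l := by rw [pvFuelA]; omega
  have hMlen : ∀ x ps, PySem.Dict.get? (PySem.Dict.mk l) x = some ps → ps.length + 2 ≤ pvFuelA l := by
    intro x ps h
    have := (pvGet?_mk_mentions l x ps h).1
    rw [pvFuelA]; omega
  have hbase : pvRunB (PySem.Dict.mk l) 1 [] cstar = some cstar := by rw [pvRunB]
  have hrun := pvRunB_sim (PySem.Dict.mk l) (pvFuelA l) hM2 hMlen (pvFuelA l)
    (PySem.Dict.mk cache) sat cstar v hgaF [] 1 cstar hbase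
  have hrunF : pvRunB (PySem.Dict.mk l) (pvFuelB l) [(sat, false)] (PySem.Dict.mk cache)
      = some cstar := by
    rw [pvFuelB]; exact hrun
  have hlook := pvGoA_lookup (PySem.Dict.mk l) (pvFuelA l) (PySem.Dict.mk cache) sat cstar v hgaF
  unfold number_of_ancestors number_of_ancestors_alt
  rw [hgaF, hrunF]
  dsimp only
  rw [PySem.Dict.getD_eq_get?_getD, hlook]
  rfl
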